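-- pv_equiv track=rewrite | github.com/Roha-Lee/sw_jungle_week_03 | roha/2617_2.py | find_bids
-- ===== SOURCE A (Python) =====
-- def dfs(graph, node, visited, count = 0):
--     for next_node in graph[node]:
--         if not visited[next_node]:
--             visited[next_node] = True
--             count = dfs(graph, next_node, visited, count+1)
--     return count
--
-- def find_bids(n, graph):
--     half = n // 2
--     count = 0
--     for bid in range(1, n+1):
--         visited = [False] * (n+1)
--         visited[bid] = True
--         if dfs(graph, bid, visited) > half:
--             count += 1
--     return count
-- ===== SOURCE B (Python) =====
-- def find_bids(n, graph):
--     half = n // 2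
--     count = 0
--     for bid in range(1, n + 1):
--         visited = {bid}
--         queue = [bid]
--         i = 0
--         while i < len(queue):
--             for nb in graph[queue[i]]:
--                 if nb not in visited:
--                     visited.add(nb)
--                     queue.append(nb)
--             i += 1
--         if len(queue) - 1 > half:
--             count += 1
--     return count
-- ===== Notes on version B (the rewrite author's own statement) =====
-- stated objective: alternative
-- what changed: The recursive DFS helper (mutating a boolean visited array and threading a counter through nested calls) is replaced by an iterative BFS: a visited hash set and a growing queue scanned by an index, with the reach count read off as len(queue)-1.
-- outside the precondition, e.g. on find_bids(1, [[], [-1]]): A returns 0, B returns 1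
import Mathlib
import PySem

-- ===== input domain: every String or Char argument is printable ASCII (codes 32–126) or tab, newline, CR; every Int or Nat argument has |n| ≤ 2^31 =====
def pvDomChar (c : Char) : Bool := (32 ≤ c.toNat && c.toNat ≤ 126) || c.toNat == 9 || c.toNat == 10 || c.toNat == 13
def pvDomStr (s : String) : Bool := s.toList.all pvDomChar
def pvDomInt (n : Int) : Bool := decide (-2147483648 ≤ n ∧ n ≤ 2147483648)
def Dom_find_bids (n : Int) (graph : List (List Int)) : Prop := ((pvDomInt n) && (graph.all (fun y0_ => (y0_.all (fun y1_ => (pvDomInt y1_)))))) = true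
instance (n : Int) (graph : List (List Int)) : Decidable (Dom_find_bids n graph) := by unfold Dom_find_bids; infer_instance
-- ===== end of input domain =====

-- B replaces A's recursive counter-threading DFS by an iterative BFS over a visited set and an
-- index-scanned queue (objective: alternative decomposition, same asymptotic cost, no recursion).

-- ===== PORT A =====
mutual
-- dfs(graph, node, visited, count): returns (visited, count); fuel only guards totality,
-- it is proved sufficient (> number of unvisited cells) inside Pre_.
def dfsA (graph : List (List Int)) (fuel : Nat) (node : Int) (visited : List Bool) (count : Int) : Option (List Bool × Int) :=
  match fuel with
  | 0 => none
  | f+1 =>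
    match PySem.List.pyGet? graph node with
    | none => none
    | some nbrs => dfsLoopA graph f nbrs visited count
termination_by (fuel, 0)

-- the 'for next_node in graph[node]' loop body of dfs
def dfsLoopA (graph : List (List Int)) (fuel : Nat) (nbrs : List Int) (visited : List Bool) (count : Int) : Option (List Bool × Int) :=
  match nbrs with
  | [] => some (visited, count)
  | x :: rest =>
    match PySem.List.pyGet? visited x with
    | none => none
    | some b =>
      if b then dfsLoopA graph fuel rest visited count
      else
        match PySem.List.pySet? visited x true with
        | none => none
        | some v1 =>
          match dfsA graph fuel x v1 (count+1) with
          | none => none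
          | some (v2, c2) => dfsLoopA graph fuel rest v2 c2
termination_by (fuel, nbrs.length + 1)
end

def find_bids (n : Int) (graph : List (List Int)) : Int :=
  let half := PySem.Int.floordiv n 2
  ((PySem.List.pyRange 1 (n+1) 1).foldl (fun acc bid =>
      match acc with
      | none => none
      | some count =>
        match PySem.List.pySet? (List.replicate (n+1).toNat false) bid true with
        | none => none
        | some v0 =>
          match dfsA graph ((n+1).toNat + 1) bid v0 0 with
          | none => none
          | some (_, c) => some (if c > half then count + 1 else count)) (some 0)).getD 0

-- ===== PORT B =====
-- the 'while i < len(queue)' loop of B; visited and queue always hold the same elements in the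
-- same order (both are appended to together), fuel only guards totality and is proved sufficient.
def bfsLoop (graph : List (List Int)) (fuel : Nat) (queue : List Int) (i : Nat) (visited : PySem.Set Int) : Option (List Int) :=
  match fuel with
  | 0 => none
  | f+1 =>
    if h : i < queue.length then
      match PySem.List.pyGet? graph queue[i] with
      | none => none
      | some nbrs =>
        let s := nbrs.foldl (fun (s : PySem.Set Int × List Int) nb =>
            if PySem.Set.contains s.1 nb then s else (PySem.Set.add s.1 nb, s.2 ++ [nb])) (visited, queue)
        bfsLoop graph f s.2 (i+1) s.1
    else some queue

def find_bids_alt (n : Int) (graph : List (List Int)) : Int :=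
  let half := PySem.Int.floordiv n 2
  ((PySem.List.pyRange 1 (n+1) 1).foldl (fun acc bid =>
      match acc with
      | none => none
      | some count =>
        match bfsLoop graph ((n+1).toNat + 1) [bid] 0 (PySem.Set.ofList [bid]) with
        | none => none
        | some q => some (if (q.length : Int) - 1 > half then count + 1 else count)) (some 0)).getD 0

-- ===== PRECONDITION & SPEC =====
-- Pre_ excludes inputs where A raises IndexError (graph shorter than n+1, or a neighbour id whose
-- visited[...] access is out of range) and the inputs with NEGATIVE neighbour ids in [-(n+1),-1],
-- where A returns a value only through Python's accidental negative-index wraparound on the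
-- visited array; B's visited set treats such an id as a fresh node, and both readings are artefacts.
def Pre_find_bids (n : Int) (graph : List (List Int)) : Prop :=
  n ≤ 0 ∨ ((n+1).toNat ≤ graph.length ∧
    ∀ l ∈ graph.take (n+1).toNat, ∀ x ∈ l, 0 ≤ x ∧ x ≤ n)
instance (n : Int) (graph : List (List Int)) : Decidable (Pre_find_bids n graph) := by
  unfold Pre_find_bids; infer_instance
def pvWitness_find_bids : Int × List (List Int) := (2, [[], [2], [1]])
def Spec_find_bids (n : Int) (graph : List (List Int)) (out : Int) : Prop := out = find_bids_alt n graph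
instance (n : Int) (graph : List (List Int)) (out : Int) : Decidable (Spec_find_bids n graph out) := by
  unfold Spec_find_bids; infer_instance

-- ===== CLAIM (what is proved, stated in full; the proofs are below) =====
def Claim_equal_find_bids : Prop := ∀ (n : Int) (graph : List (List Int)), Dom_find_bids n graph → Pre_find_bids n graph → Spec_find_bids n graph (find_bids n graph)

-- ===== LEMMAS AND PROOFS =====

-- graph[u] as a neighbour list (meaningful when the access is in range)
def nbrsOf (graph : List (List Int)) (u : Int) : List Int := (PySem.List.pyGet? graph u).getD []

-- the shape Pre_ guarantees for n ≥ 1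
def GoodGraph (n : Int) (graph : List (List Int)) : Prop :=
  (n+1).toNat ≤ graph.length ∧
  ∀ u : Int, 0 ≤ u → u ≤ n → ∀ x ∈ nbrsOf graph u, 0 ≤ x ∧ x ≤ n

-- cell i of the visited array is marked
def Mk (v : List Bool) (i : Nat) : Prop := v.getD i false = true

-- number of marked cells
def Tm (v : List Bool) : Nat := v.countP (fun b => b)

-- reachability along neighbour lists
inductive ReachG (graph : List (List Int)) (src : Int) : Int → Prop
  | refl : ReachG graph src src
  | step : ∀ {u y : Int}, ReachG graph src u → y ∈ nbrsOf graph u → ReachG graph src y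

lemma reachG_trans {graph : List (List Int)} {a b c : Int}
    (h1 : ReachG graph a b) (h2 : ReachG graph b c) : ReachG graph a c := by
  induction h2 with
  | refl => exact h1
  | step _ hy ih => exact ReachG.step ih hy

lemma good_of_pre {n : Int} {graph : List (List Int)}
    (hlen : (n+1).toNat ≤ graph.length)
    (hl : ∀ l ∈ graph.take (n+1).toNat, ∀ x ∈ l, 0 ≤ x ∧ x ≤ n) :
    GoodGraph n graph := by
  refine ⟨hlen, fun u h0 h1 x hx => ?_⟩
  have hlt : u.toNat < graph.length := by omega
  have hlt' : u.toNat < (n+1).toNat := by omega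
  have hmem : graph[u.toNat] ∈ graph.take (n+1).toNat := by
    have : (graph.take (n+1).toNat)[u.toNat]'(by simp; omega) = graph[u.toNat] := by
      simp [List.getElem_take]
    exact this ▸ List.getElem_mem _
  apply hl _ hmem
  have : nbrsOf graph u = graph[u.toNat] := by
    rw [nbrsOf, PySem.List.pyGet?_of_nonneg graph h0, List.getElem?_eq_getElem hlt]
    rfl
  rwa [this] at hx
lemma nbrs_some {n : Int} {graph : List (List Int)} (H : GoodGraph n graph)
    {u : Int} (h0 : 0 ≤ u) (h1 : u ≤ n) :
    PySem.List.pyGet? graph u = some (nbrsOf graph u) := by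
  have hlt : u.toNat < graph.length := by
    have := H.1; omega
  rw [nbrsOf, PySem.List.pyGet?_of_nonneg graph h0, List.getElem?_eq_getElem hlt]
  rfl
lemma reach_range {n : Int} {graph : List (List Int)} (H : GoodGraph n graph)
    {src x : Int} (h0 : 0 ≤ src) (h1 : src ≤ n) (hr : ReachG graph src x) :
    0 ≤ x ∧ x ≤ n := by
  induction hr with
  | refl => exact ⟨h0, h1⟩
  | step _ hy ih => exact H.2 _ ih.1 ih.2 _ hy

lemma tm_le_length (v : List Bool) : Tm v ≤ v.length := List.countP_le_length
lemma tm_set_true {v : List Bool} {i : Nat} (h : i < v.length) (hf : ¬ Mk v i) :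
    Tm (v.set i true) = Tm v + 1 := by
  induction v generalizing i with
  | nil => simp at h
  | cons a t ih =>
    cases i with
    | zero =>
      simp [Mk, List.getD] at hf
      simp [Tm, hf]
    | succ j =>
      have hf' : ¬ Mk t j := by simpa [Mk, List.getD] using hf
      have hj : j < t.length := by simpa using h
      have := ih hj hf'
      simp only [List.set_cons_succ, Tm, List.countP_cons] at *
      omega
lemma mk_set_self {v : List Bool} {i : Nat} (h : i < v.length) : Mk (v.set i true) i := by
  simp [Mk, List.getD, h]
lemma mk_set_other {v : List Bool} {i j : Nat} (hne : j ≠ i) : Mk (v.set i true) j ↔ Mk v j := by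
  simp [Mk, List.getD, List.getElem?_set_ne (Ne.symm hne)]
lemma tm_eq_range (v : List Bool) :
    Tm v = ((List.range v.length).filter (fun i => v.getD i false)).length := by
  induction v using List.reverseRecOn with
  | nil => simp [Tm]
  | append_singleton t b ih =>
    have h1 : ∀ i ∈ List.range t.length, ((t ++ [b]).getD i false) = (t.getD i false) := by
      intro i hi
      simp only [List.mem_range] at hi
      simp [List.getD, List.getElem?_append_left hi]
    rw [Tm, List.countP_append, List.length_append, List.length_singleton, List.range_succ,
      List.filter_append, List.length_append, List.filter_congr h1]
    have h2 : (t ++ [b]).getD t.length false = b := by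
      simp [List.getD]
    cases b <;> simp only [h2, List.filter_cons, List.filter_nil] <;> simp <;> simpa [Tm, List.getD] using ih
lemma tm_mono {v w : List Bool} (hlen : w.length = v.length)
    (hm : ∀ i, Mk v i → Mk w i) : Tm v ≤ Tm w := by
  rw [tm_eq_range, tm_eq_range, hlen]
  exact List.Sublist.length_le (List.monotone_filter_right _ (fun i hi => hm i hi))
-- the statement of the dfsA induction, at a fixed fuel
def DfsSpecAt (n : Int) (graph : List (List Int)) (f : Nat) : Prop :=
  ∀ (node : Int) (v : List Bool) (c : Int),
    0 ≤ node → node ≤ n → v.length = (n+1).toNat → Mk v node.toNat →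
    v.length - Tm v < f →
    ∃ v', dfsA graph f node v c = some (v', c + ((Tm v' : Int) - (Tm v : Int))) ∧
      v'.length = v.length ∧
      (∀ i, Mk v i → Mk v' i) ∧
      (∀ i, i < v.length → Mk v' i → Mk v i ∨ ReachG graph node (i : Int)) ∧
      (∀ x ∈ nbrsOf graph node, Mk v' x.toNat) ∧
      (∀ i, i < v.length → Mk v' i → ¬ Mk v i → ∀ y ∈ nbrsOf graph (i : Int), Mk v' y.toNat)

lemma loop_spec {n : Int} {graph : List (List Int)}
    {f : Nat} (IH : DfsSpecAt n graph f) :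
    ∀ (nbrs : List Int) (v : List Bool) (c : Int),
    (∀ x ∈ nbrs, 0 ≤ x ∧ x ≤ n) → v.length = (n+1).toNat →
    v.length - Tm v ≤ f →
    ∃ v', dfsLoopA graph f nbrs v c = some (v', c + ((Tm v' : Int) - (Tm v : Int))) ∧
      v'.length = v.length ∧
      (∀ i, Mk v i → Mk v' i) ∧
      (∀ i, i < v.length → Mk v' i → Mk v i ∨ ∃ x ∈ nbrs, ReachG graph x (i : Int)) ∧
      (∀ x ∈ nbrs, Mk v' x.toNat) ∧
      (∀ i, i < v.length → Mk v' i → ¬ Mk v i → ∀ y ∈ nbrsOf graph (i : Int), Mk v' y.toNat) := by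
  intro nbrs
  induction nbrs with
  | nil =>
    intro v c _ _ _
    exact ⟨v, by simp [dfsLoopA], rfl, fun i h => h, fun i _ h => Or.inl h, by simp,
      fun i _ h hn => absurd h hn⟩
  | cons x rest ih =>
    intro v c hr hlen hf
    obtain ⟨hx0, hxn⟩ := hr x List.mem_cons_self
    have hxlt : x.toNat < v.length := by omega
    have hget : PySem.List.pyGet? v x = some (v.getD x.toNat false) := by
      rw [PySem.List.pyGet?_of_nonneg v hx0, List.getElem?_eq_getElem hxlt]
      simp [List.getD, List.getElem?_eq_getElem hxlt]
    by_cases hb : Mk v x.toNat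
    · have hbt : v.getD x.toNat false = true := hb
      obtain ⟨v', heq, hlen', hmono, hsound, hnb, hclosed⟩ :=
        ih v c (fun y hy => hr y (List.mem_cons_of_mem _ hy)) hlen hf
      refine ⟨v', ?_, hlen', hmono, ?_, ?_, hclosed⟩
      · rw [dfsLoopA, hget, hbt]
        simpa using heq
      · intro i hi hm
        rcases hsound i hi hm with h | ⟨x', hx', hrc⟩
        · exact Or.inl h
        · exact Or.inr ⟨x', List.mem_cons_of_mem _ hx', hrc⟩
      · intro y hy
        rcases List.mem_cons.1 hy with rfl | hy
        · exact hmono _ hb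
        · exact hnb y hy
    · have hbf : v.getD x.toNat false = false := by
        cases hgd : v.getD x.toNat false
        · rfl
        · exact absurd (show Mk v x.toNat from hgd) hb
      have hxcast : ((x.toNat : Nat) : Int) = x := Int.toNat_of_nonneg hx0
      have hset : PySem.List.pySet? v x true = some (v.set x.toNat true) := by
        have h := PySem.List.pySet?_natCast v x.toNat true hxlt
        rwa [hxcast] at h
      set v1 := v.set x.toNat true with hv1
      have hlen1 : v1.length = v.length := by simp [hv1]
      have ht1 : Tm v1 = Tm v + 1 := tm_set_true hxlt hb
      have htle : Tm v1 ≤ v1.length := tm_le_length v1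
      have hmk1 : Mk v1 x.toNat := mk_set_self hxlt
      obtain ⟨v2, heq2, hlen2, hmono2, hsound2, hnb2, hclosed2⟩ :=
        IH x v1 (c+1) hx0 hxn (by omega) hmk1 (by omega)
      have ht2 : Tm v1 ≤ Tm v2 := tm_mono hlen2 hmono2
      obtain ⟨v', heq3, hlen3, hmono3, hsound3, hnb3, hclosed3⟩ :=
        ih v2 (c + 1 + ((Tm v2 : Int) - (Tm v1 : Int)))
          (fun y hy => hr y (List.mem_cons_of_mem _ hy)) (by omega) (by omega)
      have hmono12 : ∀ i, Mk v i → Mk v' i := by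
        intro i hi
        apply hmono3; apply hmono2
        by_cases hix : i = x.toNat
        · subst hix; exact hmk1
        · exact (mk_set_other hix).2 hi
      refine ⟨v', ?_, by omega, hmono12, ?_, ?_, ?_⟩
      · rw [dfsLoopA, hget, hbf]
        simp only [Bool.false_eq_true, if_false, hset, heq2, heq3]
        congr 2
        omega
      · intro i hi hm
        rcases hsound3 i (by omega) hm with h2 | ⟨x', hx', hrc⟩
        · rcases hsound2 i (by omega) h2 with h1 | hrc
          · by_cases hix : i = x.toNat
            · subst hix
              refine Or.inr ⟨x, List.mem_cons_self, ?_⟩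
              rw [hxcast]; exact ReachG.refl
            · exact Or.inl ((mk_set_other hix).1 h1)
          · exact Or.inr ⟨x, List.mem_cons_self, hrc⟩
        · exact Or.inr ⟨x', List.mem_cons_of_mem _ hx', hrc⟩
      · intro y hy
        rcases List.mem_cons.1 hy with rfl | hy
        · exact hmono3 _ (hmono2 _ hmk1)
        · exact hnb3 y hy
      · intro i hi hm hnm
        by_cases h2 : Mk v2 i
        · by_cases h1 : Mk v1 i
          · by_cases hix : i = x.toNat
            · subst hix
              intro y hy
              rw [hxcast] at hy
              exact hmono3 _ (hnb2 y hy)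
            · exact absurd ((mk_set_other hix).1 h1) hnm
          · intro y hy
            exact hmono3 _ (hclosed2 i (by omega) h2 h1 y hy)
        · exact hclosed3 i (by omega) hm h2

lemma dfs_spec {n : Int} {graph : List (List Int)} (H : GoodGraph n graph) :
    ∀ f, DfsSpecAt n graph f := by
  intro f
  induction f with
  | zero => intro node v c _ _ _ _ hf; omega
  | succ f ihf =>
    intro node v c h0 h1 hlen hmk hf
    obtain ⟨v', heq, hlen', hmono, hsound, hnb, hclosed⟩ :=
      loop_spec ihf (nbrsOf graph node) v c (H.2 node h0 h1) hlen (by omega)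
    refine ⟨v', ?_, hlen', hmono, ?_, hnb, hclosed⟩
    · rw [dfsA, nbrs_some H h0 h1]
      exact heq
    · intro i hi hm
      rcases hsound i hi hm with h | ⟨x, hx, hrc⟩
      · exact Or.inl h
      · exact Or.inr (reachG_trans (ReachG.step ReachG.refl hx) hrc)

lemma dfs_marks {n : Int} {graph : List (List Int)} (H : GoodGraph n graph)
    {bid : Int} (hb1 : 1 ≤ bid) (hb2 : bid ≤ n) :
    ∃ V c, dfsA graph ((n+1).toNat + 1) bid ((List.replicate (n+1).toNat false).set bid.toNat true) 0
        = some (V, c) ∧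
      V.length = (n+1).toNat ∧ c = (Tm V : Int) - 1 ∧
      (∀ i, i < (n+1).toNat → (Mk V i ↔ ReachG graph bid (i : Int))) := by
  have hbcast : ((bid.toNat : Nat) : Int) = bid := Int.toNat_of_nonneg (by omega)
  set N := (n+1).toNat with hN
  have hblt : bid.toNat < N := by omega
  set v0 := (List.replicate N false).set bid.toNat true with hv0
  have hlen0 : v0.length = N := by simp [hv0]
  have hrep : ∀ i, ¬ Mk (List.replicate N false) i := by
    intro i h
    rw [Mk, List.getD] at h
    rcases lt_or_ge i N with hi | hi
    · simp [hi] at h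
    · rw [List.getElem?_eq_none (by simpa using hi)] at h
      simp at h
  have htrep : Tm (List.replicate N false) = 0 := by simp [Tm]
  have ht0 : Tm v0 = 1 := by
    rw [hv0, tm_set_true (by simpa using hblt) (hrep _), htrep]
  have hmk0 : Mk v0 bid.toNat := mk_set_self (by simpa using hblt)
  have hmk0' : ∀ i, Mk v0 i → i = bid.toNat := by
    intro i h
    by_contra hne
    exact hrep i ((mk_set_other hne).1 h)
  obtain ⟨V, heq, hlenV, hmono, hsound, hnb, hclosed⟩ :=
    dfs_spec H (N + 1) bid v0 0 (by omega) hb2 hlen0 hmk0 (by omega)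
  have hcomplete : ∀ x, ReachG graph bid x → Mk V x.toNat := by
    intro x hr
    induction hr with
    | refl => exact hmono _ hmk0
    | step hru hy ihu =>
      rename_i u y
      obtain ⟨hu0, hun⟩ := reach_range H (by omega) hb2 hru
      by_cases hub : u = bid
      · subst hub
        exact hnb y hy
      · have hune : u.toNat ≠ bid.toNat := by omega
        have hnm : ¬ Mk v0 u.toNat := fun h => hune (hmk0' _ h)
        have hult : u.toNat < v0.length := by omega
        have := hclosed u.toNat hult ihu hnm
        rw [Int.toNat_of_nonneg hu0] at this
        exact this y hy
  refine ⟨V, 0 + ((Tm V : Int) - (Tm v0 : Int)), heq, by omega, by omega, ?_⟩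
  intro i hi
  constructor
  · intro hm
    rcases hsound i (by omega) hm with h | h
    · have := hmk0' i h
      subst this
      rw [hbcast]
      exact ReachG.refl
    · exact h
  · intro hr
    have := hcomplete _ hr
    simpa using this

lemma nodup_length_le {n : Int} {q : List Int} (hq : q.Nodup)
    (hr : ∀ x ∈ q, 0 ≤ x ∧ x ≤ n) : q.length ≤ (n+1).toNat := by
  have h1 : q.toFinset.card = q.length := List.toFinset_card_of_nodup hq
  have h2 : q.toFinset ⊆ Finset.Icc 0 n := by
    intro x hx
    rw [List.mem_toFinset] at hx
    simp [Finset.mem_Icc]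
    exact hr x hx
  have := Finset.card_le_card h2
  rw [Int.card_Icc] at this
  omega
lemma bfs_fold (nbrs q : List Int) (hq : q.Nodup) :
    ∃ q', nbrs.foldl (fun (s : PySem.Set Int × List Int) nb =>
        if PySem.Set.contains s.1 nb then s else (PySem.Set.add s.1 nb, s.2 ++ [nb])) (q, q)
        = (q', q') ∧
      q'.Nodup ∧ q <+: q' ∧ (∀ y ∈ nbrs, y ∈ q') ∧ (∀ y ∈ q', y ∈ q ∨ y ∈ nbrs) := by
  induction nbrs generalizing q with
  | nil => exact ⟨q, rfl, hq, List.prefix_refl q, by simp, fun y hy => Or.inl hy⟩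
  | cons nb rest ih =>
    simp only [List.foldl_cons]
    by_cases hc : nb ∈ q
    · have : PySem.Set.contains q nb = true := (PySem.Set.contains_iff _ _).2 hc
      rw [if_pos this]
      obtain ⟨q', heq, hn, hp, hall, hsub⟩ := ih q hq
      refine ⟨q', heq, hn, hp, ?_, ?_⟩
      · intro y hy
        rcases List.mem_cons.1 hy with rfl | hy
        · exact hp.subset hc
        · exact hall y hy
      · intro y hy
        rcases hsub y hy with h | h
        · exact Or.inl h
        · exact Or.inr (List.mem_cons_of_mem _ h)
    · have : ¬ PySem.Set.contains q nb = true := fun h => hc ((PySem.Set.contains_iff _ _).1 h)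
      rw [if_neg this]
      have hadd : PySem.Set.add q nb = q ++ [nb] := by
        rw [PySem.Set.add, if_neg this]
      rw [hadd]
      have hq2 : (q ++ [nb]).Nodup := by
        rw [List.nodup_append]
        refine ⟨hq, List.nodup_singleton _, ?_⟩
        intro a ha b hb
        simp only [List.mem_singleton] at hb
        subst hb
        intro h; exact hc (h ▸ ha)
      obtain ⟨q', heq, hn, hp, hall, hsub⟩ := ih (q ++ [nb]) hq2
      refine ⟨q', heq, hn, (List.prefix_append q [nb]).trans hp, ?_, ?_⟩
      · intro y hy
        rcases List.mem_cons.1 hy with rfl | hy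
        · exact hp.subset (by simp)
        · exact hall y hy
      · intro y hy
        rcases hsub y hy with h | h
        · rcases List.mem_append.1 h with h | h
          · exact Or.inl h
          · simp at h; subst h; exact Or.inr (by simp)
        · exact Or.inr (List.mem_cons_of_mem _ h)
lemma bfs_spec {n : Int} {graph : List (List Int)} (H : GoodGraph n graph) {src : Int} :
    ∀ (f : Nat) (q : List Int) (i : Nat), q.Nodup →
    (∀ x ∈ q, 0 ≤ x ∧ x ≤ n) → (∀ x ∈ q, ReachG graph src x) →
    (∀ j, j < i → ∀ y ∈ nbrsOf graph (q.getD j 0), y ∈ q) →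
    i ≤ q.length → (n+1).toNat + 1 ≤ f + i →
    ∃ q', bfsLoop graph f q i q = some q' ∧ q'.Nodup ∧
      (∀ x ∈ q', 0 ≤ x ∧ x ≤ n) ∧ (∀ x ∈ q, x ∈ q') ∧
      (∀ x ∈ q', ReachG graph src x) ∧
      (∀ x ∈ q', ∀ y ∈ nbrsOf graph x, y ∈ q') := by
  intro f
  induction f with
  | zero =>
    intro q i hq hr hs hproc hi hfuel
    have := nodup_length_le hq hr
    omega
  | succ f ihf =>
    intro q i hq hr hs hproc hi hfuel
    by_cases hilt : i < q.length
    · have hnode := hr _ (List.getElem_mem hilt)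
      obtain ⟨q2, heq2, hq2, hp2, hall2, hsub2⟩ := bfs_fold (nbrsOf graph q[i]) q hq
      have hgd : ∀ j, j < q.length → q2.getD j 0 = q.getD j 0 := by
        intro j hj
        obtain ⟨t, rfl⟩ := hp2
        simp [List.getD, List.getElem?_append_left hj]
      have hr2 : ∀ x ∈ q2, 0 ≤ x ∧ x ≤ n := by
        intro x hx
        rcases hsub2 x hx with h | h
        · exact hr x h
        · exact H.2 _ hnode.1 hnode.2 x h
      have hs2 : ∀ x ∈ q2, ReachG graph src x := by
        intro x hx
        rcases hsub2 x hx with h | h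
        · exact hs x h
        · exact ReachG.step (hs _ (List.getElem_mem hilt)) h
      have hproc2 : ∀ j, j < i + 1 → ∀ y ∈ nbrsOf graph (q2.getD j 0), y ∈ q2 := by
        intro j hj y hy
        rcases Nat.lt_or_ge j i with hji | hji
        · rw [hgd j (by omega)] at hy
          exact hp2.subset (hproc j hji y hy)
        · have hj' : j = i := by omega
          subst hj'
          rw [hgd j hilt] at hy
          have : q.getD j 0 = q[j] := by simp [List.getD, List.getElem?_eq_getElem hilt]
          rw [this] at hy
          exact hall2 y hy
      obtain ⟨q', heq', hq', hr', hsup', hs', hcl'⟩ :=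
        ihf q2 (i+1) hq2 hr2 hs2 hproc2 (by have := hp2.length_le; omega) (by omega)
      refine ⟨q', ?_, hq', hr', fun x hx => hsup' x (hp2.subset hx), hs', hcl'⟩
      rw [bfsLoop, dif_pos hilt, nbrs_some H hnode.1 hnode.2]
      simp only [heq2]
      exact heq'
    · refine ⟨q, ?_, hq, hr, fun x hx => hx, hs, ?_⟩
      · rw [bfsLoop, dif_neg hilt]
      · intro x hx y hy
        obtain ⟨j, hj, rfl⟩ := List.getElem_of_mem hx
        have : q.getD j 0 = q[j] := by simp [List.getD, List.getElem?_eq_getElem hj]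
        exact hproc j (by omega) y (by rwa [this])

lemma bfs_marks {n : Int} {graph : List (List Int)} (H : GoodGraph n graph)
    {bid : Int} (hb1 : 1 ≤ bid) (hb2 : bid ≤ n) :
    ∃ q', bfsLoop graph ((n+1).toNat + 1) [bid] 0 (PySem.Set.ofList [bid]) = some q' ∧
      q'.Nodup ∧ (∀ x, x ∈ q' ↔ ReachG graph bid x) := by
  have hof : PySem.Set.ofList [bid] = [bid] := rfl
  obtain ⟨q', heq, hq', hr', hsup', hs', hcl'⟩ :=
    bfs_spec H (src := bid) ((n+1).toNat + 1) [bid] 0 (List.nodup_singleton _)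
      (by intro x hx; simp at hx; subst hx; omega)
      (by intro x hx; simp at hx; subst hx; exact ReachG.refl)
      (by intro j hj; omega)
      (by simp) (by omega)
  refine ⟨q', by rw [hof]; exact heq, hq', fun x => ⟨hs' x, ?_⟩⟩
  intro hr
  induction hr with
  | refl => exact hsup' bid (by simp)
  | step hru hy ihu => exact hcl' _ ihu _ hy

-- counting bridge: a nodup list of the marked indices has length Tm V
lemma length_eq_tm {V : List Bool} {q : List Int} (hq : q.Nodup)
    (hmem : ∀ x, x ∈ q ↔ (0 ≤ x ∧ x.toNat < V.length ∧ Mk V x.toNat)) :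
    q.length = Tm V := by
  have hnn : ∀ x ∈ q, 0 ≤ x := fun x hx => ((hmem x).1 hx).1
  have h1 : (q.map Int.toNat).Nodup := by
    refine hq.map_on (fun x hx y hy h => ?_)
    have := hnn x hx; have := hnn y hy; omega
  have h2 : ((List.range V.length).filter (fun i => V.getD i false)).Nodup :=
    List.Nodup.filter _ (List.nodup_range)
  have h3 : ∀ i : Nat, i ∈ q.map Int.toNat ↔ i ∈ (List.range V.length).filter (fun i => V.getD i false) := by
    intro i
    simp only [List.mem_map, List.mem_filter, List.mem_range]
    constructor
    · rintro ⟨x, hx, rfl⟩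
      obtain ⟨h0, hlt, hmk⟩ := (hmem x).1 hx
      exact ⟨hlt, hmk⟩
    · rintro ⟨hlt, hmk⟩
      refine ⟨(i : Int), (hmem _).2 ⟨by positivity, by simpa using ⟨hlt, hmk⟩⟩, by simp⟩
  have h4 : (q.map Int.toNat).toFinset = ((List.range V.length).filter (fun i => V.getD i false)).toFinset := by
    apply Finset.ext; intro i; simp only [List.mem_toFinset]; exact h3 i
  have e1 := List.toFinset_card_of_nodup h1
  have e2 := List.toFinset_card_of_nodup h2
  have e3 : (q.map Int.toNat).toFinset.card = ((List.range V.length).filter (fun i => V.getD i false)).toFinset.card := by rw [h4]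
  rw [tm_eq_range]
  have hlq : (q.map Int.toNat).length = q.length := by simp
  omega
theorem find_bids_spec : Claim_equal_find_bids := by
  unfold Claim_equal_find_bids
  intro n graph _ hpre
  unfold Spec_find_bids
  by_cases hn : n ≤ 0
  · have hr : PySem.List.pyRange 1 (n+1) 1 = [] := PySem.List.pyRange_one_eq_nil (by omega)
    simp [find_bids, find_bids_alt, hr]
  · rcases hpre with h | ⟨hlen, hl⟩
    · omega
    · have H := good_of_pre hlen hl
      simp only [find_bids, find_bids_alt]
      congr 1
      apply PySem.List.foldl_congr_mem'
      intro bid hbid acc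
      obtain ⟨hb1, hb2'⟩ := (PySem.List.mem_pyRange_one).1 hbid
      have hb2 : bid ≤ n := by omega
      cases acc with
      | none => rfl
      | some c =>
        have hblt : bid.toNat < (List.replicate (n+1).toNat (false : Bool)).length := by
          simp; omega
        have hset := PySem.List.pySet?_natCast (List.replicate (n+1).toNat false) bid.toNat true hblt
        rw [Int.toNat_of_nonneg (by omega : (0:Int) ≤ bid)] at hset
        obtain ⟨V, cval, heqA, hlenV, hc, hiff⟩ := dfs_marks H hb1 hb2
        obtain ⟨q', heqB, hqnd, hmemB⟩ := bfs_marks H hb1 hb2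
        have hqlen : q'.length = Tm V := by
          apply length_eq_tm hqnd
          intro x
          rw [hmemB]
          constructor
          · intro hr
            obtain ⟨h0, hxn⟩ := reach_range H (by omega) hb2 hr
            have hlt : x.toNat < V.length := by omega
            refine ⟨h0, hlt, ?_⟩
            apply (hiff x.toNat (by omega)).2
            rwa [Int.toNat_of_nonneg h0]
          · rintro ⟨h0, hlt, hmk⟩
            have hr := (hiff x.toNat (by omega)).1 hmk
            rwa [Int.toNat_of_nonneg h0] at hr
        simp only [hset, heqA, heqB]
        rw [hc, hqlen]
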